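-- pv_equiv track=rewrite | github.com/daedalus/libtor | src/libtor/directory.py | _check_port_in_list
-- ===== SOURCE A (Python) =====
-- def _check_port_in_list(port: int, portlist: str, accept: bool) -> bool:
--     """Check if a port is in the port list.
--
--     PortList format: comma-separated list of ports and ranges
--     e.g., "80,443,8080-8090"
--
--     Default is accept if no rule matches (per Tor spec).
--     """
--     default_accept = True  # Per Tor spec: if no rule matches, accept
--     if not portlist or portlist == "*":
--         return accept if not accept else True  # accept *:* or reject *:*
--
--     for part in portlist.split(","):
--         part = part.strip()
--         if not part:
--             continue
--         if "-" in part: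
--             try:
--                 start, end = part.split("-", 1)
--                 if start.isdigit() and end.isdigit():
--                     if start.isdigit() and end.isdigit():
--                         if start.isdigit() and end.isdigit():
--                             if int(start) <= port <= int(end):
--                                 return accept
--             except ValueError:
--                 continue
--         else:
--             if part.isdigit():
--                 if int(part) == port:
--                     return accept
--
--     return default_accept
-- ===== SOURCE B (Python) =====
-- def _check_port_in_list(port: int, portlist: str, accept: bool) -> bool:
--     """Two-phase re-implementation: parse the portlist into explicit
--     (start, end) range tuples, then answer the membership query."""
--     if not portlist or portlist == "*":
--         return accept
--     ranges = []
--     for part in portlist.split(","):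
--         part = part.strip()
--         if "-" in part:
--             a, b = part.split("-", 1)
--             if a.isdigit() and b.isdigit():
--                 ranges.append((int(a), int(b)))
--         elif part.isdigit():
--             p = int(part)
--             ranges.append((p, p))
--     return accept if any(s <= port <= e for s, e in ranges) else True
-- ===== Notes on version B (the rewrite author's own statement) =====
-- stated objective: simpler
-- what changed: Replaced the interleaved parse-and-early-return loop (with redundant triple-nested digit checks and a dead try/except) by a two-phase decomposition: build an explicit list of (start, end) range tuples, then answer with a single any() membership query.
import Mathlib
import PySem

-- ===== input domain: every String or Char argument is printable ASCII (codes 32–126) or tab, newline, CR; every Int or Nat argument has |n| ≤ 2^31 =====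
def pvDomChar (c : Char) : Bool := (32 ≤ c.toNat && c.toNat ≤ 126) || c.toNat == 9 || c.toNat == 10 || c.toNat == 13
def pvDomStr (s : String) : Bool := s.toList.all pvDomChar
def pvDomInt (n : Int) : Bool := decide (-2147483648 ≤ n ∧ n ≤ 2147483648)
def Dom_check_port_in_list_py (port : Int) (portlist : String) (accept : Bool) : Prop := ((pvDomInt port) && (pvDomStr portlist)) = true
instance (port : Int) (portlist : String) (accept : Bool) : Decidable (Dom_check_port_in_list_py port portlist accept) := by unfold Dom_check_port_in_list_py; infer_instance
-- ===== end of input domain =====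

-- B replaces A's interleaved parse-and-early-return loop by a two-phase decomposition
-- (first build a list of (start, end) range tuples, then one any() membership query); objective: simpler.

-- ===== PORT A =====
-- the loop body of A, recursing over the split parts; returns default_accept = true if no rule matched
def checkPartsA (port : Int) (accept : Bool) : List String → Bool
  | [] => true
  | p :: rest =>
    let part := PySem.Str.strip p
    if part == "" then checkPartsA port accept rest
    else if PySem.Str.isIn "-" part then
      -- part.split("-", 1); tuple unpacking can only succeed (the try/except is dead);
      -- the triple-nested identical isdigit tests of A are kept literally
      match PySem.Str.splitMax? part "-" 1 with
      | some [s, e] =>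
        if PySem.Str.strIsdigit s && PySem.Str.strIsdigit e then
          if PySem.Str.strIsdigit s && PySem.Str.strIsdigit e then
            if PySem.Str.strIsdigit s && PySem.Str.strIsdigit e then
              if decide ((PySem.Int.ofStr? s).getD 0 ≤ port) && decide (port ≤ (PySem.Int.ofStr? e).getD 0) then
                accept
              else checkPartsA port accept rest
            else checkPartsA port accept rest
          else checkPartsA port accept rest
        else checkPartsA port accept rest
      | _ => checkPartsA port accept rest
    else
      if PySem.Str.strIsdigit part then
        if decide ((PySem.Int.ofStr? part).getD 0 = port) then accept
        else checkPartsA port accept rest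
      else checkPartsA port accept rest

def check_port_in_list_py (port : Int) (portlist : String) (accept : Bool) : Bool :=
  if portlist == "" || portlist == "*" then
    (if !accept then accept else true)
  else
    checkPartsA port accept ((PySem.Str.split? portlist ",").getD [])

-- ===== PORT B =====
-- phase 1: parse the split parts into explicit (start, end) range tuples
def parseRanges : List String → List (Int × Int)
  | [] => []
  | p :: rest =>
    let part := PySem.Str.strip p
    if PySem.Str.isIn "-" part then
      match PySem.Str.splitMax? part "-" 1 with
      | some [a, b] =>
        if PySem.Str.strIsdigit a && PySem.Str.strIsdigit b then
          ((PySem.Int.ofStr? a).getD 0, (PySem.Int.ofStr? b).getD 0) :: parseRanges rest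
        else parseRanges rest
      | _ => parseRanges rest
    else if PySem.Str.strIsdigit part then
      ((PySem.Int.ofStr? part).getD 0, (PySem.Int.ofStr? part).getD 0) :: parseRanges rest
    else parseRanges rest

def check_port_in_list_py_alt (port : Int) (portlist : String) (accept : Bool) : Bool :=
  if portlist == "" || portlist == "*" then accept
  else
    -- phase 2: membership query over the range table
    if (parseRanges ((PySem.Str.split? portlist ",").getD [])).any
        (fun r => decide (r.1 ≤ port) && decide (port ≤ r.2)) then accept
    else true

-- ===== PRECONDITION & SPEC =====
def Spec_check_port_in_list_py (port : Int) (portlist : String) (accept : Bool) (out : Bool) : Prop := out = check_port_in_list_py_alt port portlist accept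
instance (port : Int) (portlist : String) (accept : Bool) (out : Bool) : Decidable (Spec_check_port_in_list_py port portlist accept out) := by unfold Spec_check_port_in_list_py; infer_instance

-- ===== CLAIM (what is proved, stated in full; the proofs are below) =====
def Claim_equal_check_port_in_list_py : Prop := ∀ (port : Int) (portlist : String) (accept : Bool), Dom_check_port_in_list_py port portlist accept → Spec_check_port_in_list_py port portlist accept (check_port_in_list_py port portlist accept)

-- ===== LEMMAS AND PROOFS =====

-- A's early-return loop equals "any range matches → accept, else default true" over B's range table
set_option maxHeartbeats 1000000 in
theorem checkPartsA_eq_any (port : Int) (accept : Bool) (parts : List String) :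
    checkPartsA port accept parts =
      (if (parseRanges parts).any (fun r => decide (r.1 ≤ port) && decide (port ≤ r.2)) then accept
       else true) := by
  induction parts with
  | nil => simp [checkPartsA, parseRanges]
  | cons p rest ih =>
    rw [checkPartsA, parseRanges]
    by_cases hdash : PySem.Str.isIn "-" (PySem.Str.strip p) = true
    · -- a '-' occurs, so the stripped part is non-empty; both sides case on the split
      have hne : PySem.Str.strip p ≠ "" := by
        intro h; rw [h] at hdash; exact absurd hdash (by decide)
      have hdashC := hdash; simp at hdashC
      cases hsp : PySem.Str.splitMax? (PySem.Str.strip p) "-" 1 with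
      | none => simp [hne, hdashC, ih]
      | some l =>
        match l with
        | [] => simp [hne, hdashC, ih]
        | [a] => simp [hne, hdashC, ih]
        | [a, b] =>
          by_cases hd : (PySem.Chars.strIsdigit a.toList = true ∧ PySem.Chars.strIsdigit b.toList = true)
          · by_cases hm : ((PySem.Int.ofStr? a).getD 0 ≤ port ∧ port ≤ (PySem.Int.ofStr? b).getD 0)
            · simp [hne, hdashC, hd, hm]
            · have h1 : (¬ (PySem.Int.ofStr? a).getD 0 ≤ port) ∨
                        (¬ port ≤ (PySem.Int.ofStr? b).getD 0) := by tauto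
              simp [hne, hdashC, hd, ih]
              rcases h1 with h1 | h1 <;> simp [h1]
          · simp [hne, hdashC, hd, ih]
        | a :: b :: c :: t => simp [hne, hdashC, ih]
    · -- no '-' in the part: a lone port number, or a part both sides skip
      rw [if_neg hdash, if_neg hdash]
      by_cases hdig : PySem.Str.strIsdigit (PySem.Str.strip p) = true
      · have hne : PySem.Str.strip p ≠ "" := by
          intro h; rw [h] at hdig; exact absurd hdig (by decide)
        have hdigC := hdig; simp at hdigC
        generalize (PySem.Int.ofStr? (PySem.Str.strip p)).getD 0 = v
        by_cases he : v = port
        · simp [hne, hdigC, he]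
        · have h1 : (¬ v ≤ port) ∨ (¬ port ≤ v) := by omega
          simp [hne, hdigC, he, ih]
          rcases h1 with h1 | h1 <;> simp [h1]
      · have hdigC := hdig; simp at hdigC
        by_cases hne : PySem.Str.strip p = ""
        · have h0 : PySem.Chars.strIsdigit ([] : List Char) = false := by decide
          simp [hne, h0, ih]
        · simp [hne, hdigC, ih]

-- ===== VERDICT (by name: the statement is the Claim_ definition above) =====
theorem check_port_in_list_py_spec : Claim_equal_check_port_in_list_py := by
  intro port portlist accept _
  unfold Spec_check_port_in_list_py check_port_in_list_py check_port_in_list_py_alt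
  by_cases hg : (portlist == "" || portlist == "*") = true
  · cases accept <;> simp [hg]
  · simp only [hg, Bool.false_eq_true, if_false]
    exact checkPartsA_eq_any port accept ((PySem.Str.split? portlist ",").getD [])
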